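-- pv_equiv track=rewrite | github.com/moleece/aoc_23 | 2023/stephen/stephen/14/14.py | sort_row
-- ===== SOURCE A (Python) =====
-- def sort_row(row):
--     sorted_row = []
--     i = 0
--     for i in range(len(row)):
--         if row[i] == 0:
--             continue
--         if row[i] == 1:
--             sorted_row.append(1)
--         if row[i] == -1:
--             for n in range(i - len(sorted_row)):
--                 sorted_row.append(0)
--             sorted_row.append(-1)
--         i += 1
--
--     if len(sorted_row) < len(row):
--         for n in range(len(row) - len(sorted_row)):
--             sorted_row.append(0)
--
--     return sorted_row
-- ===== SOURCE B (Python) =====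
-- def sort_row(row):
--     out = []
--     seg = []
--     for x in row:
--         if x == -1:
--             ones = sum(1 for y in seg if y == 1)
--             out += [1] * ones + [0] * (len(seg) - ones) + [-1]
--             seg = []
--         else:
--             seg.append(x)
--     ones = sum(1 for y in seg if y == 1)
--     out += [1] * ones + [0] * (len(seg) - ones)
--     return out
-- ===== Notes on version B (the rewrite author's own statement) =====
-- stated objective: alternative
-- what changed: B splits the row into wall-separated segments and rebuilds each segment as ones-then-zeros from a count, instead of A's index-based loop that pads with zeros up to the current index at each wall and at the end.
import Mathlib
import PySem

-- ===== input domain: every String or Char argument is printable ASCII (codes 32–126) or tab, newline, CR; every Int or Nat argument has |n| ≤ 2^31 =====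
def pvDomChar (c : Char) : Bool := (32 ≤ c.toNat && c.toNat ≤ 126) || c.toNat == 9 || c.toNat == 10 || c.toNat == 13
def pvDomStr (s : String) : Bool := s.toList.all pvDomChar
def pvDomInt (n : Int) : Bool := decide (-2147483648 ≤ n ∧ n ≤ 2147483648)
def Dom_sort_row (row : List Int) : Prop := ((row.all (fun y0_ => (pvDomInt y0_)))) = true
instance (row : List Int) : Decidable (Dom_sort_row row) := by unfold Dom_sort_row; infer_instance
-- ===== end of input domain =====

-- B rebuilds the row segment-by-segment between the -1 walls (ones counted, then zeros),
-- instead of A's index-based loop that zero-pads up to the current index at each wall; alternative decomposition, same cost.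

-- ===== PORT A =====
def sort_row (row : List Int) : List Int :=
  let s := (PySem.List.pyRange 0 (row.length : Int) 1).foldl (fun sorted_row i =>
    let x := PySem.List.pyGetD row i 0
    if x = 0 then sorted_row
    else
      let sorted_row := if x = 1 then sorted_row ++ [1] else sorted_row
      if x = -1 then
        ((PySem.List.pyRange 0 (i - (sorted_row.length : Int)) 1).foldl
          (fun a _ => a ++ [(0 : Int)]) sorted_row) ++ [-1]
      else sorted_row) []
  if s.length < row.length then
    (PySem.List.pyRange 0 ((row.length : Int) - (s.length : Int)) 1).foldl
      (fun a _ => a ++ [(0 : Int)]) s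
  else s

-- ===== PORT B =====
-- emit one wall-free segment: its round rocks (1s) first, zeros for the rest
def pvFlush (seg : List Int) : List Int :=
  let ones := seg.countP (fun y => y == 1)
  List.replicate ones 1 ++ List.replicate (seg.length - ones) 0

def sort_row_alt (row : List Int) : List Int :=
  let p := row.foldl (fun (p : List Int × List Int) x =>
    if x = -1 then (p.1 ++ pvFlush p.2 ++ [-1], ([] : List Int))
    else (p.1, p.2 ++ [x])) (([] : List Int), ([] : List Int))
  p.1 ++ pvFlush p.2

-- ===== PRECONDITION & SPEC =====
def Spec_sort_row (row : List Int) (out : List Int) : Prop := out = sort_row_alt row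
instance (row : List Int) (out : List Int) : Decidable (Spec_sort_row row out) := by unfold Spec_sort_row; infer_instance

-- ===== CLAIM (what is proved, stated in full; the proofs are below) =====
def Claim_equal_sort_row : Prop := ∀ (row : List Int), Dom_sort_row row → Spec_sort_row row (sort_row row)

-- ===== LEMMAS AND PROOFS =====

-- A's loop body, as a function of (index, element)
def pvStepA (row : List Int) (sorted_row : List Int) (p : Int × Int) : List Int :=
  let x := p.2
  if x = 0 then sorted_row
  else
    let sorted_row := if x = 1 then sorted_row ++ [1] else sorted_row
    if x = -1 then
      ((PySem.List.pyRange 0 (p.1 - (sorted_row.length : Int)) 1).foldl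
        (fun a _ => a ++ [(0 : Int)]) sorted_row) ++ [-1]
    else sorted_row

-- B's loop body
def pvStepB (p : List Int × List Int) (x : Int) : List Int × List Int :=
  if x = -1 then (p.1 ++ pvFlush p.2 ++ [-1], ([] : List Int))
  else (p.1, p.2 ++ [x])

theorem pv_foldl_zeros {α : Type} (l : List α) (acc : List Int) :
    l.foldl (fun a _ => a ++ [(0 : Int)]) acc = acc ++ List.replicate l.length 0 := by
  induction l generalizing acc with
  | nil => simp
  | cons x t ih =>
    simp only [List.foldl_cons, ih, List.length_cons, List.append_assoc,
      List.replicate_succ, List.singleton_append]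

theorem pv_lenB (t : List Int) : ∀ (out seg : List Int),
    (t.foldl pvStepB (out, seg)).1.length + (t.foldl pvStepB (out, seg)).2.length
      = out.length + seg.length + t.length := by
  induction t with
  | nil => intro out seg; simp
  | cons x t ih =>
    intro out seg
    by_cases hx : x = -1
    · simp only [List.foldl_cons, pvStepB, hx]
      rw [ih]
      simp [pvFlush]
      have := List.countP_le_length (l := seg) (p := fun y => y == 1)
      omega
    · simp only [List.foldl_cons, pvStepB, if_neg hx]
      rw [ih]
      simp; omega

theorem pv_main (t : List Int) : ∀ (s : Nat) (out seg : List Int),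
    s = out.length + seg.length →
    (PySem.List.enumerate t (s : Int)).foldl (pvStepA row)
        (out ++ List.replicate (seg.countP (fun y => y == 1)) 1)
      = (t.foldl pvStepB (out, seg)).1
        ++ List.replicate ((t.foldl pvStepB (out, seg)).2.countP (fun y => y == 1)) 1 := by
  induction t with
  | nil => intro s out seg _; simp [PySem.List.enumerate_nil]
  | cons x t ih =>
    intro s out seg hs
    have hc : seg.countP (fun y => y == 1) ≤ seg.length := List.countP_le_length
    rw [PySem.List.enumerate_cons, List.foldl_cons, List.foldl_cons]
    by_cases h1 : x = 1
    · have hA : pvStepA row (out ++ List.replicate (seg.countP (fun y => y == 1)) 1) ((s : Int), x)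
          = (out ++ List.replicate ((seg ++ [x]).countP (fun y => y == 1)) 1) := by
        subst h1
        simp [pvStepA, List.replicate_succ', ← List.append_assoc]
      rw [hA]
      have hB : pvStepB (out, seg) x = (out, seg ++ [x]) := by
        simp [pvStepB, h1]
      rw [hB]
      have : ((s : Int) + 1) = ((s + 1 : Nat) : Int) := by push_cast; ring
      rw [this]
      exact ih (s + 1) out (seg ++ [x]) (by simp [hs]; omega)
    · by_cases hm1 : x = -1
      · have hz : ((s : Int) - ((out ++ List.replicate (seg.countP (fun y => y == 1)) 1).length : Int)).toNat
            = seg.length - seg.countP (fun y => y == 1) := by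
          simp; omega
        have hA : pvStepA row (out ++ List.replicate (seg.countP (fun y => y == 1)) 1) ((s : Int), x)
            = (out ++ pvFlush seg ++ [-1]) ++ List.replicate (([] : List Int).countP (fun y => y == 1)) 1 := by
          subst hm1
          have e1 : pvStepA row (out ++ List.replicate (seg.countP (fun y => y == 1)) 1) ((s : Int), -1)
              = ((PySem.List.pyRange 0 ((s : Int) - (((out ++ List.replicate (seg.countP (fun y => y == 1)) 1).length : Nat) : Int)) 1).foldl
                  (fun a _ => a ++ [(0 : Int)]) (out ++ List.replicate (seg.countP (fun y => y == 1)) 1)) ++ [-1] := by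
            norm_num [pvStepA]
          rw [e1, pv_foldl_zeros, PySem.List.length_pyRange_one]
          simp only [Int.sub_zero, hz, pvFlush, List.countP_nil, List.replicate_zero,
            List.append_nil, List.append_assoc]
        rw [hA]
        have hB : pvStepB (out, seg) x = (out ++ pvFlush seg ++ [-1], ([] : List Int)) := by
          simp [pvStepB, hm1]
        rw [hB]
        have : ((s : Int) + 1) = ((s + 1 : Nat) : Int) := by push_cast; ring
        rw [this]
        refine ih (s + 1) (out ++ pvFlush seg ++ [-1]) [] ?_
        simp [pvFlush]; omega
      · have hA : pvStepA row (out ++ List.replicate (seg.countP (fun y => y == 1)) 1) ((s : Int), x)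
            = (out ++ List.replicate ((seg ++ [x]).countP (fun y => y == 1)) 1) := by
          by_cases h0 : x = 0
          · subst h0; simp [pvStepA]
          · simp [pvStepA, h0, h1, hm1]
        rw [hA]
        have hB : pvStepB (out, seg) x = (out, seg ++ [x]) := by
          simp [pvStepB, hm1]
        rw [hB]
        have : ((s : Int) + 1) = ((s + 1 : Nat) : Int) := by push_cast; ring
        exact this ▸ ih (s + 1) out (seg ++ [x]) (by simp [hs]; omega)

-- ===== VERDICT (by name: the statement is the Claim_ definition above) =====
theorem sort_row_spec : Claim_equal_sort_row := by
  intro row _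
  unfold Spec_sort_row sort_row sort_row_alt
  have henum : (PySem.List.pyRange 0 (row.length : Int) 1).foldl (fun sorted_row i =>
      let x := PySem.List.pyGetD row i 0
      if x = 0 then sorted_row
      else
        let sorted_row := if x = 1 then sorted_row ++ [1] else sorted_row
        if x = -1 then
          ((PySem.List.pyRange 0 (i - (sorted_row.length : Int)) 1).foldl
            (fun a _ => a ++ [(0 : Int)]) sorted_row) ++ [-1]
        else sorted_row) []
      = (PySem.List.enumerate row (0 : Int)).foldl (pvStepA row) [] := by
    rw [PySem.List.enumerate_eq_map_pyRange (d := 0), List.foldl_map]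
    rfl
  rw [henum]
  have hmain := pv_main (row := row) row 0 [] [] (by simp)
  simp only [List.countP_nil, List.replicate_zero, List.nil_append, Nat.cast_zero] at hmain
  rw [hmain]
  set q := row.foldl pvStepB ([], []) with hq
  have hlen := pv_lenB row [] []
  rw [← hq] at hlen
  simp only [List.length_nil, Nat.zero_add] at hlen
  have hc : q.2.countP (fun y => y == 1) ≤ q.2.length := List.countP_le_length
  have hfold : row.foldl (fun (p : List Int × List Int) x =>
      if x = -1 then (p.1 ++ pvFlush p.2 ++ [-1], ([] : List Int))
      else (p.1, p.2 ++ [x])) (([] : List Int), ([] : List Int)) = q := by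
    rw [hq]; rfl
  rw [hfold]
  by_cases hlt : (q.1 ++ List.replicate (q.2.countP (fun y => y == 1)) 1).length < row.length
  · rw [if_pos hlt, pv_foldl_zeros, PySem.List.length_pyRange_one]
    have hn : (((row.length : Int) - (((q.1 ++ List.replicate (q.2.countP (fun y => y == 1)) 1).length : Nat) : Int)) - 0).toNat
        = q.2.length - q.2.countP (fun y => y == 1) := by
      simp; omega
    rw [hn]
    simp [pvFlush]
  · rw [if_neg hlt]
    have : q.2.countP (fun y => y == 1) = q.2.length := by
      simp at hlt; omega
    simp [pvFlush, this]
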